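-- pv_equiv track=rewrite | github.com/tanakaht/atcoder | problems/agc036/agc036_b.py | solve
-- ===== SOURCE A (Python) =====
-- from collections import defaultdict
-- from bisect import bisect
--
-- def solve_naive(X):
--     d = defaultdict(list)
--     for i, x in enumerate(X):
--         d[x].append(i)
--     ret = []
--     i = 0
--     while i < len(X):
--         if d[X[i]][-1] != i:
--             i = d[X[i]][bisect(d[X[i]], i)] + 1
--         else:
--             ret.append(X[i])
--             i += 1
--     return ret
--
-- def solve(A, K):
--     d = defaultdict(list)
--     for i, x in enumerate(A):
--         d[x].append(i)
--
--     def transition(loop_idx, list_idx):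
--         l = d[A[list_idx]]
--         idx = l[bisect(l, list_idx)-len(l)]
--         loop_idx += (idx <= list_idx)
--         return loop_idx, (idx+1)%len(A)
--
--     appear = [0] * len(A)
--     tmp = 0
--     while appear[tmp] == 0:
--         appear[tmp] = 1
--         _, tmp = transition(0, tmp)
--     loop_start = tmp
--
--     tmp = 0
--     cnt = 0
--     while tmp != loop_start:
--         cnt, tmp = transition(cnt, tmp)
--     before_loop_list_idx = tmp
--     before_loop_loop_idx = cnt
--
--     tmp = loop_start
--     cnt = 1
--     cnt, tmp = transition(cnt, tmp)
--     while tmp != loop_start: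
--         cnt, tmp = transition(cnt, tmp)
--     loop_cnt = cnt
--
--     K -= 1
--     # ここもなおさんとTLE
--     if K < before_loop_loop_idx:
--         return solve_rest(A, K, 0)
--     else:
--         K -= before_loop_loop_idx
--         K %= loop_cnt
--         return solve_rest(A, K, before_loop_list_idx)
--
-- def solve_rest(A, K, rest_idx):
--     d = defaultdict(list)
--     for i, x in enumerate(A):
--         d[x].append(i)
--
--     def transition(loop_idx, list_idx):
--         l = d[A[list_idx]]
--         idx = l[bisect(l, list_idx)-len(l)]
--         loop_idx += (idx <= list_idx)
--         return loop_idx, (idx+1)%len(A)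
--
--     tmp = rest_idx
--     cnt = 1
--     while cnt <= K:
--         cnt, tmp = transition(cnt, tmp)
--     return solve_naive(A[tmp:])
-- ===== SOURCE B (Python) =====
-- def solve(A, K):
--     n = len(A)
--     # first occurrence of each value
--     first = {}
--     for i, x in enumerate(A):
--         if x not in first:
--             first[x] = i
--     # successor position and wrap flag for each start position (right-to-left pass)
--     nxtpos = [0] * n
--     wraps = [0] * n
--     last_seen = {}
--     for i in range(n - 1, -1, -1):
--         j = last_seen.get(A[i])
--         if j is None:
--             j = first[A[i]]
--         nxtpos[i] = (j + 1) % n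
--         wraps[i] = 1 if j <= i else 0
--         last_seen[A[i]] = i
--     # one recorded orbit walk from 0 until a state repeats
--     states = [0]
--     W = [0]
--     seen = {0: 0}
--     while True:
--         s = states[-1]
--         s2 = nxtpos[s]
--         states.append(s2)
--         W.append(W[-1] + wraps[s])
--         if s2 in seen:
--             break
--         seen[s2] = len(states) - 1
--     p = seen[states[-1]]
--     m = len(states) - 1
--     b = W[p]
--     L = 1 + (W[m] - W[p])
--     Kp = K - 1
--     if Kp < b:
--         j = next(j for j in range(len(W)) if W[j] >= Kp)
--         T = states[j]
--     else:
--         Kpp = (Kp - b) % L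
--         i = next(i for i in range(m - p + 1) if W[p + i] - W[p] >= Kpp)
--         T = states[p + i]
--     # stack reduction of the remaining suffix
--     stack = []
--     for x in A[T:]:
--         if x in stack:
--             while stack.pop() != x:
--                 pass
--         else:
--             stack.append(x)
--     return stack
-- ===== Notes on version B (the rewrite author's own statement) =====
-- stated objective: alternative
-- what changed: B replaces A's four separate pointer-chasing walks (visited-array cycle finding, two re-walks for the pre-loop count and cycle count, and the solve_rest walk) by one recorded orbit walk whose table answers all four questions by lookup, replaces the dict-of-position-lists + bisect transition by two linear array-building passes, and replaces the jump-scan stack reduction (solve_naive) by a direct stack simulation.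
import Mathlib
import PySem

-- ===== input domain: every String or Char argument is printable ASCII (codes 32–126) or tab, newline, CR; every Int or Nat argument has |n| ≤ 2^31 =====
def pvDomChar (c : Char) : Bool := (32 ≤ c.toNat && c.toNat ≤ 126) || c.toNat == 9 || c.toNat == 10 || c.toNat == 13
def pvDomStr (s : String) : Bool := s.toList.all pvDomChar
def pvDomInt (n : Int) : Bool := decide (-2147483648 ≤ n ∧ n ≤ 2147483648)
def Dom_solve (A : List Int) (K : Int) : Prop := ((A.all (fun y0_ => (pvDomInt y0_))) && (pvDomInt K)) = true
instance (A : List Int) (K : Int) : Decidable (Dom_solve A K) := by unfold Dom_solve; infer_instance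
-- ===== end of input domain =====

-- B replaces A's four separate pointer-chasing walks by one recorded orbit walk with table
-- lookups, its dict-of-position-lists + bisect transition by two linear array passes, and the
-- jump-scan reduction by a direct stack simulation (objective: alternative).

-- ===== PORT A =====

-- d = defaultdict(list); for i, x in enumerate(X): d[x].append(i)
def buildD (X : List Int) : PySem.Dict Int (List Int) :=
  (PySem.List.enumerate X 0).foldl (fun d p => d.modify p.2 [] (fun l => l ++ [p.1])) PySem.Dict.empty

-- the closure 'transition(loop_idx, list_idx)' shared by solve / solve_rest
def transA (X : List Int) (d : PySem.Dict Int (List Int)) (loopIdx listIdx : Int) : Int × Int :=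
  let l := d.getD (PySem.List.pyGetD X listIdx 0) []
  let idx := PySem.List.pyGetD l ((PySem.List.bisectRight l listIdx : Int) - (l.length : Int)) 0
  (loopIdx + (if idx ≤ listIdx then 1 else 0), PySem.Int.mod (idx + 1) (X.length : Int))

-- the 'while i < len(X)' loop of solve_naive (fuel: i strictly increases each iteration)
def naiveLoop (X : List Int) (d : PySem.Dict Int (List Int)) (ret : List Int) (i : Int) : Nat → List Int
  | 0 => ret
  | fuel + 1 =>
    if i < (X.length : Int) then
      if PySem.List.pyGetD (d.getD (PySem.List.pyGetD X i 0) []) (-1) 0 ≠ i then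
        naiveLoop X d ret
          (PySem.List.pyGetD (d.getD (PySem.List.pyGetD X i 0) [])
            ((PySem.List.bisectRight (d.getD (PySem.List.pyGetD X i 0) []) i : Int)) 0 + 1) fuel
      else
        naiveLoop X d (ret ++ [PySem.List.pyGetD X i 0]) (i + 1) fuel
    else ret

def solve_naive (X : List Int) : List Int := naiveLoop X (buildD X) [] 0 (X.length + 1)

-- the 'while cnt <= K' loop of solve_rest
def restLoop (X : List Int) (d : PySem.Dict Int (List Int)) (K cnt tmp : Int) : Nat → Int
  | 0 => tmp
  | fuel + 1 =>
    if cnt ≤ K then restLoop X d K (transA X d cnt tmp).1 (transA X d cnt tmp).2 fuel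
    else tmp

def solve_rest (X : List Int) (K restIdx : Int) : List Int :=
  solve_naive (PySem.List.slice X (some (restLoop X (buildD X) K 1 restIdx (X.length + 1))) none)

-- 'while appear[tmp] == 0: appear[tmp] = 1; _, tmp = transition(0, tmp)'
def appearLoop (X : List Int) (d : PySem.Dict Int (List Int)) (appear : List Int) (tmp : Int) : Nat → Int
  | 0 => tmp
  | fuel + 1 =>
    if PySem.List.pyGetD appear tmp 0 = 0 then
      appearLoop X d (appear.set tmp.toNat 1) (transA X d 0 tmp).2 fuel
    else tmp

-- 'while tmp != loop_start: cnt, tmp = transition(cnt, tmp)'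
def whileNeLoop (X : List Int) (d : PySem.Dict Int (List Int)) (target cnt tmp : Int) : Nat → Int × Int
  | 0 => (cnt, tmp)
  | fuel + 1 =>
    if tmp ≠ target then whileNeLoop X d target (transA X d cnt tmp).1 (transA X d cnt tmp).2 fuel
    else (cnt, tmp)

def solve (A : List Int) (K : Int) : List Int :=
  let d := buildD A
  let loopStart := appearLoop A d (List.replicate A.length 0) 0 (A.length + 1)
  let beforeLoop := whileNeLoop A d loopStart 0 0 (A.length + 1)
  let loopCnt := (whileNeLoop A d loopStart (transA A d 1 loopStart).1 (transA A d 1 loopStart).2 (A.length + 1)).1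
  if K - 1 < beforeLoop.1 then solve_rest A (K - 1) 0
  else solve_rest A (PySem.Int.mod (K - 1 - beforeLoop.1) loopCnt) beforeLoop.2

-- ===== PORT B =====

-- first = {}; for i, x in enumerate(A): if x not in first: first[x] = i
def firstOccDict (A : List Int) : PySem.Dict Int Int :=
  (PySem.List.enumerate A 0).foldl (fun f p => if f.contains p.2 then f else f.insert p.2 p.1) PySem.Dict.empty

-- body of the right-to-left pass filling nxtpos / wraps / last_seen
def tableStep (A : List Int) (first : PySem.Dict Int Int)
    (st : List Int × List Int × PySem.Dict Int Int) (i : Int) : List Int × List Int × PySem.Dict Int Int :=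
  let x := PySem.List.pyGetD A i 0
  let j := match st.2.2.get? x with
           | none => first.getD x 0
           | some j => j
  (st.1.set i.toNat (PySem.Int.mod (j + 1) (A.length : Int)),
   st.2.1.set i.toNat (if j ≤ i then 1 else 0),
   st.2.2.insert x i)

def buildTables (A : List Int) : List Int × List Int :=
  let r := (PySem.List.pyRange ((A.length : Int) - 1) (-1) (-1)).foldl (tableStep A (firstOccDict A))
      (List.replicate A.length 0, List.replicate A.length 0, PySem.Dict.empty)
  (r.1, r.2.1)

-- the recorded orbit walk ('while True: ... if s2 in seen: break')
def orbitLoop (nxtpos wraps : List Int) (states W : List Int) (seen : PySem.Dict Int Int) :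
    Nat → List Int × List Int × PySem.Dict Int Int
  | 0 => (states, W, seen)
  | fuel + 1 =>
    let s := PySem.List.pyGetD states (-1) 0
    let s2 := PySem.List.pyGetD nxtpos s 0
    let states' := states ++ [s2]
    let W' := W ++ [PySem.List.pyGetD W (-1) 0 + PySem.List.pyGetD wraps s 0]
    if seen.contains s2 then (states', W', seen)
    else orbitLoop nxtpos wraps states' W' (seen.insert s2 ((states'.length : Int) - 1)) fuel

-- 'while stack.pop() != x: pass' — exact when x ∈ s (guaranteed by the branch that calls it)
def popTo (s : List Int) (x : Int) : List Int :=
  ((s.reverse.dropWhile (fun y => y != x)).tail).reverse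

def stackStep (stack : List Int) (x : Int) : List Int :=
  if stack.contains x then popTo stack x else stack ++ [x]

def solve_alt (A : List Int) (K : Int) : List Int :=
  let t := buildTables A
  let r := orbitLoop t.1 t.2 [0] [0] (PySem.Dict.empty.insert 0 0) (A.length + 1)
  let states := r.1
  let W := r.2.1
  let p := r.2.2.getD (PySem.List.pyGetD states (-1) 0) 0
  let m : Int := (states.length : Int) - 1
  let b := PySem.List.pyGetD W p 0
  let L := 1 + (PySem.List.pyGetD W m 0 - b)
  let Kp := K - 1
  let T :=
    if Kp < b then
      PySem.List.pyGetD states ((W.findIdx (fun w => decide (Kp ≤ w)) : Int)) 0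
    else
      PySem.List.pyGetD states
        (p + (((W.drop p.toNat).findIdx (fun w => decide (PySem.Int.mod (Kp - b) L ≤ w - b)) : Int))) 0
  (PySem.List.slice A (some T) none).foldl stackStep []

-- ===== PRECONDITION & SPEC =====
-- Pre_ excludes only the empty list, on which the Python A raises IndexError (appear[0]).
def Pre_solve (A : List Int) (K : Int) : Prop := A ≠ []
instance (A : List Int) (K : Int) : Decidable (Pre_solve A K) := by unfold Pre_solve; infer_instance
def pvWitness_solve : List Int × Int := ([1, 2, 1], 2)
def Spec_solve (A : List Int) (K : Int) (out : List Int) : Prop := out = solve_alt A K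
instance (A : List Int) (K : Int) (out : List Int) : Decidable (Spec_solve A K out) := by unfold Spec_solve; infer_instance

-- ===== CLAIM (what is proved, stated in full; the proofs are below) =====
def Claim_equal_solve : Prop := ∀ (A : List Int) (K : Int), Dom_solve A K → Pre_solve A K → Spec_solve A K (solve A K)

-- ===== LEMMAS AND PROOFS =====

-- the increasing list of positions of x in X (as Ints)
def occL (A : List Int) (x : Int) : List Int :=
  ((PySem.List.enumerate A 0).filter (fun p => p.2 == x)).map (fun p => p.1)

-- next position of A[s] strictly after s, wrapping to the first position if none
def nxtJ (A : List Int) (s : Int) : Int :=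
  ((occL A (PySem.List.pyGetD A s 0)).find? (fun j => decide (s < j))).getD
    (occL A (PySem.List.pyGetD A s 0)).headI

def Ftrans (A : List Int) (s : Int) : Int := (transA A (buildD A) 0 s).2
def wTrans (A : List Int) (s : Int) : Int := (transA A (buildD A) 0 s).1
def sOrb (A : List Int) (j : Nat) : Int := (Ftrans A)^[j] 0
def WsumA (A : List Int) (j : Nat) : Int := ((List.range j).map (fun t => wTrans A (sOrb A t))).sum

lemma getD_buildD (X : List Int) (x : Int) : (buildD X).getD x [] = occL X x := by
  have h : buildD X = ((PySem.List.enumerate X 0).map Prod.swap).foldl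
      (fun d p => d.modify p.1 [] (fun l => l ++ [p.2])) PySem.Dict.empty := by
    rw [List.foldl_map]; rfl
  rw [h, PySem.Dict.getD_foldl_modify_append, PySem.Dict.getD_empty]
  simp [occL, List.filter_map, List.map_map, Function.comp_def, Prod.swap]

lemma occ_sorted (X : List Int) (x : Int) : (occL X x).Pairwise (· < ·) := by
  have := PySem.List.pairwise_lt_enumerate X 0
  exact List.pairwise_map.mpr ((this.filter _))

lemma mem_occL {X : List Int} {x j : Int} :
    j ∈ occL X x ↔ ∃ (k : Nat) (_ : k < X.length), j = (k : Int) ∧ X[k] = x := by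
  simp only [occL, List.mem_map, List.mem_filter, PySem.List.mem_enumerate_iff]
  constructor
  · rintro ⟨p, ⟨⟨k, hk, rfl⟩, hx⟩, rfl⟩
    exact ⟨k, hk, by simpa using hx.symm ▸ rfl, by simpa using hx⟩
  · rintro ⟨k, hk, rfl, rfl⟩
    exact ⟨((k : Int), X[k]), ⟨⟨k, hk, by simp⟩, by simp⟩, rfl⟩

lemma find?_first {p : Int → Bool} {l : List Int} {j : Int} (hs : l.Pairwise (· < ·))
    (hj : j ∈ l) (hpj : p j = true) (hlt : ∀ y ∈ l, y < j → p y = false) :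
    l.find? p = some j := by
  induction l with
  | nil => cases hj
  | cons a t ih =>
    rcases List.mem_cons.mp hj with rfl | hjt
    · simp [List.find?, hpj]
    · have haj : a < j := (List.pairwise_cons.mp hs).1 j hjt
      have hpa : p a = false := hlt a (List.mem_cons_self ..) haj
      simp only [List.find?, hpa]
      exact ih (List.pairwise_cons.mp hs).2 hjt (fun y hy => hlt y (List.mem_cons_of_mem _ hy))

lemma self_mem_occ {X : List Int} {s : Int} (h0 : 0 ≤ s) (hn : s < X.length) :
    s ∈ occL X (PySem.List.pyGetD X s 0) := by
  refine mem_occL.mpr ⟨s.toNat, by omega, by omega, ?_⟩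
  exact (PySem.List.pyGetD_eq_getElem X 0 h0 hn).symm

-- the bisect-based transition body computes nxtJ

-- l[bisect(l,s)-len(l)] is: first element > s, else l[0]
lemma bisect_core {l : List Int} {s : Int} (hnil : l ≠ []) (hsorted : l.Pairwise (· < ·))
    (hmem : s ∈ l) :
    PySem.List.pyGetD l ((PySem.List.bisectRight l s : Int) - (l.length : Int)) 0 =
      (l.find? (fun j => decide (s < j))).getD l.headI := by
  obtain ⟨hk_le, hk_lo, hk_hi⟩ := PySem.List.bisectRight_spec l s (hsorted.imp (fun h => le_of_lt h))
  set k := PySem.List.bisectRight l s with hk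
  obtain ⟨ks, hks, hkseq⟩ := List.mem_iff_getElem.mp hmem
  have hks_lt : ks < k := by
    by_contra hcon
    exact absurd (hkseq ▸ hk_hi ks hks (by omega)) (lt_irrefl s)
  by_cases hcase : k = l.length
  · have hfind : l.find? (fun j => decide (s < j)) = none := by
      apply List.find?_eq_none.mpr
      intro y hy
      obtain ⟨i, hi, rfl⟩ := List.mem_iff_getElem.mp hy
      simpa using hk_lo i hi (by omega)
    rw [hfind, hcase]
    simp only [sub_self, Option.getD_none, PySem.List.pyGetD_zero]
    cases l with
    | nil => exact absurd rfl hnil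
    | cons a t => rfl
  · have hklt : k < l.length := lt_of_le_of_ne hk_le hcase
    have hmono : ∀ i j (hi : i < l.length) (hj : j < l.length), i < j → l[i] < l[j] :=
      fun i j hi hj hij => List.pairwise_iff_getElem.mp hsorted i j hi hj hij
    have hfind : l.find? (fun j => decide (s < j)) = some l[k] := by
      apply find?_first hsorted (List.getElem_mem hklt) (by simpa using hk_hi k hklt le_rfl)
      intro y hy hylt
      obtain ⟨i, hi, rfl⟩ := List.mem_iff_getElem.mp hy
      have hik : i < k := by
        by_contra hcon
        rcases Nat.lt_or_ge k i with h' | h'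
        · exact absurd (hmono k i hklt hi h') (by omega)
        · have : i = k := by omega
          subst this; exact absurd hylt (lt_irrefl _)
      simpa using hk_lo i hi hik
    have e : (k : Int) - (l.length : Int) = -(((l.length - k : Nat)) : Int) := by omega
    rw [hfind, e, PySem.List.pyGetD_neg_natCast l (l.length - k) 0 (by omega) (by omega)]
    simp only [Option.getD_some]
    congr 1; omega

-- the bisect-based transition body computes nxtJ
lemma transA_char (X : List Int) {s : Int} (h0 : 0 ≤ s) (hn : s < X.length) (c : Int) :
    transA X (buildD X) c s =
      (c + (if nxtJ X s ≤ s then 1 else 0), PySem.Int.mod (nxtJ X s + 1) (X.length : Int)) := by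
  have hmem := self_mem_occ h0 hn
  have hnil : occL X (PySem.List.pyGetD X s 0) ≠ [] := List.ne_nil_of_mem hmem
  have hcore := bisect_core hnil (occ_sorted X _) hmem
  simp only [transA, getD_buildD, hcore, nxtJ]
  rfl

lemma find?_congr_mem {l : List Int} {p q : Int → Bool} (h : ∀ a ∈ l, p a = q a) :
    l.find? p = l.find? q := by
  induction l with
  | nil => rfl
  | cons a t ih =>
    have ha := h a (List.mem_cons_self ..)
    simp only [List.find?, ← ha]
    cases hpa : p a
    · exact ih (fun b hb => h b (List.mem_cons_of_mem _ hb))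
    · rfl

lemma firstOcc_get? (A : List Int) (x : Int) :
    (firstOccDict A).get? x = ((PySem.List.enumerate A 0).find? (fun p => p.2 == x)).map (fun p => p.1) := by
  suffices h : ∀ (ps : List (Int × Int)) (f0 : PySem.Dict Int Int),
      (ps.foldl (fun f p => if f.contains p.2 then f else f.insert p.2 p.1) f0).get? x =
        if f0.contains x then f0.get? x else (ps.find? (fun p => p.2 == x)).map (fun p => p.1) by
    rw [firstOccDict, h]
    simp [PySem.Dict.contains_empty]
  intro ps
  induction ps with
  | nil =>
    intro f0
    simp only [List.foldl_nil, List.find?_nil, Option.map_none]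
    by_cases hc : f0.contains x
    · rw [if_pos hc]
    · rw [if_neg (by simp [hc]), (PySem.Dict.get?_eq_none_iff_contains f0 x).mpr (by simpa using hc)]
  | cons p t ih =>
    intro f0
    rw [List.foldl_cons]
    by_cases hc : f0.contains p.2
    · rw [if_pos hc, ih]
      cases hx : (p.2 == x) with
      | true =>
        have hxe : x = p.2 := (beq_iff_eq.mp hx).symm
        subst hxe
        rw [List.find?_cons_of_pos (l := t) (show (fun q : Int × Int => q.2 == p.2) p = true from hx), if_pos hc, if_pos hc]
      | false =>
        rw [List.find?_cons_of_neg (l := t) (show ¬ (fun q : Int × Int => q.2 == x) p = true from ne_true_of_eq_false hx)]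
    · rw [if_neg hc, ih]
      cases hx : (p.2 == x) with
      | true =>
        have hxe : x = p.2 := (beq_iff_eq.mp hx).symm
        subst hxe
        rw [List.find?_cons_of_pos (l := t) (show (fun q : Int × Int => q.2 == p.2) p = true from hx), if_neg hc]
        have h1 : (f0.insert p.2 p.1).contains p.2 = true := by
          rw [PySem.Dict.contains_insert]; simp
        rw [if_pos h1, PySem.Dict.get?_insert_self]
        rfl
      | false =>
        have hxe : x ≠ p.2 := fun h => ne_of_beq_false hx h.symm
        rw [List.find?_cons_of_neg (l := t) (show ¬ (fun q : Int × Int => q.2 == x) p = true from ne_true_of_eq_false hx)]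
        have h1 : (f0.insert p.2 p.1).contains x = f0.contains x := by
          rw [PySem.Dict.contains_insert]
          simp [hxe]
        rw [h1, PySem.Dict.get?_insert_of_ne _ _ hxe]

lemma firstOcc_getD {A : List Int} {x : Int} (h : occL A x ≠ []) :
    (firstOccDict A).getD x 0 = (occL A x).headI := by
  have h1 : (occL A x).head? = ((PySem.List.enumerate A 0).find? (fun p => p.2 == x)).map (fun p => p.1) := by
    rw [occL, List.head?_map, List.head?_filter]
  rw [PySem.Dict.getD_eq_get?_getD, firstOcc_get?, ← h1]
  obtain ⟨a, t, he⟩ := List.exists_cons_of_ne_nil h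
  rw [he]; rfl

def TblInv (A : List Int) (t : Nat) (st : List Int × List Int × PySem.Dict Int Int) : Prop :=
  st.1.length = A.length ∧ st.2.1.length = A.length ∧
  (∀ s : Nat, t ≤ s → (hs : s < A.length) →
      st.1.getD s 0 = PySem.Int.mod (nxtJ A (s : Int) + 1) (A.length : Int) ∧
      st.2.1.getD s 0 = (if nxtJ A (s : Int) ≤ (s : Int) then 1 else 0)) ∧
  (∀ x : Int, st.2.2.get? x = (occL A x).find? (fun j => decide ((t : Int) ≤ j)))

lemma tblStep (A : List Int) {t : Nat} {st : List Int × List Int × PySem.Dict Int Int}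
    (hinv : TblInv A (t + 1) st) (ht : t < A.length) :
    TblInv A t (tableStep A (firstOccDict A) st (t : Int)) := by
  obtain ⟨hl1, hl2, hval, hdict⟩ := hinv
  have hx : PySem.List.pyGetD A (t : Int) 0 = A[t] := by
    rw [PySem.List.pyGetD_eq_getElem A 0 (by omega) (by exact_mod_cast ht)]
    simp
  set x := PySem.List.pyGetD A (t : Int) 0 with hxdef
  -- the computed j is nxtJ A t
  have hcongr : (occL A x).find? (fun j => decide ((t : Int) + 1 ≤ j)) =
      (occL A x).find? (fun j => decide ((t : Int) < j)) :=
    find?_congr_mem (fun a _ => decide_eq_decide.mpr (by omega))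
  have hj : (match st.2.2.get? x with
      | none => (firstOccDict A).getD x 0
      | some j => j) = nxtJ A (t : Int) := by
    rw [hdict x]
    push_cast
    rw [hcongr]
    cases hf : (occL A x).find? (fun j => decide ((t : Int) < j)) with
    | none =>
      have hnn : occL A x ≠ [] := List.ne_nil_of_mem (self_mem_occ (by omega) (by exact_mod_cast ht))
      simp only [nxtJ, ← hxdef, hf, Option.getD_none]
      exact firstOcc_getD hnn
    | some j => simp only [nxtJ, ← hxdef, hf, Option.getD_some]
  refine ⟨?_, ?_, ?_, ?_⟩
  · simp [tableStep, hl1]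
  · simp [tableStep, hl2]
  · intro s hts hs
    simp only [tableStep, ← hxdef, hj, Int.toNat_natCast]
    rcases Nat.eq_or_lt_of_le hts with rfl | hlt
    · constructor
      · rw [List.getD_eq_getElem _ _ (by simpa [hl1] using hs)]
        rw [List.getElem_set_self (by simp; omega)]
      · rw [List.getD_eq_getElem _ _ (by simpa [hl2] using hs)]
        rw [List.getElem_set_self (by simp; omega)]
    · have hne : t ≠ s := by omega
      constructor
      · rw [List.getD_eq_getElem _ _ (by simpa [hl1] using hs), List.getElem_set_ne hne,
          ← List.getD_eq_getElem _ _ (by simpa [hl1] using hs)]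
        exact (hval s (by omega) hs).1
      · rw [List.getD_eq_getElem _ _ (by simpa [hl2] using hs), List.getElem_set_ne hne,
          ← List.getD_eq_getElem _ _ (by simpa [hl2] using hs)]
        exact (hval s (by omega) hs).2
  · intro y
    simp only [tableStep, ← hxdef]
    by_cases hyx : y = x
    · subst hyx
      rw [PySem.Dict.get?_insert_self]
      have hmem : (t : Int) ∈ occL A x := self_mem_occ (by omega) (by exact_mod_cast ht)
      have hres : (occL A x).find? (fun j => decide ((t : Int) ≤ j)) = some (t : Int) := by
        apply find?_first (occ_sorted A x) hmem (by simp)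
        intro z _ hz
        simpa using by omega
      rw [hres]
    · rw [PySem.Dict.get?_insert_of_ne _ _ hyx, hdict y]
      push_cast
      apply find?_congr_mem
      intro a ha
      obtain ⟨k, hk, rfl, hak⟩ := mem_occL.mp ha
      have : (k : Int) ≠ (t : Int) := by
        intro he
        have : k = t := by omega
        subst this
        exact hyx (by rw [← hak, hx])
      exact decide_eq_decide.mpr (by omega)

lemma tblFold (A : List Int) : ∀ (t : Nat) (st : List Int × List Int × PySem.Dict Int Int),
    t ≤ A.length → TblInv A t st →
    TblInv A 0 ((PySem.List.pyRange ((t : Int) - 1) (-1) (-1)).foldl (tableStep A (firstOccDict A)) st) := by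
  intro t
  induction t with
  | zero => intro st _ h; rw [PySem.List.pyRange_neg_one_eq_nil (by omega)]; exact h
  | succ t ih =>
    intro st hle hinv
    have he : (((t + 1 : Nat) : Int) - 1) = (t : Int) := by push_cast; ring
    rw [he, PySem.List.pyRange_neg_one_cons (by omega), List.foldl_cons]
    exact ih _ (by omega) (tblStep A hinv (by omega))

lemma table_char (A : List Int) {s : Int} (h0 : 0 ≤ s) (hn : s < A.length) :
    (buildTables A).1.getD s.toNat 0 = PySem.Int.mod (nxtJ A s + 1) (A.length : Int) ∧
    (buildTables A).2.getD s.toNat 0 = (if nxtJ A s ≤ s then 1 else 0) := by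
  have hbase : TblInv A A.length (List.replicate A.length 0, List.replicate A.length 0, PySem.Dict.empty) := by
    refine ⟨by simp, by simp, fun s h1 h2 => absurd h1 (by omega), fun x => ?_⟩
    rw [PySem.Dict.get?_empty]
    symm
    apply List.find?_eq_none.mpr
    intro j hj
    obtain ⟨k, hk, rfl, _⟩ := mem_occL.mp hj
    simpa using by omega
  have h := tblFold A A.length _ le_rfl hbase
  obtain ⟨_, _, hval, _⟩ := h
  have h1 := (hval s.toNat (by omega) (by omega)).1
  have h2 := (hval s.toNat (by omega) (by omega)).2
  rw [Int.toNat_of_nonneg h0] at h1 h2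
  exact ⟨h1, h2⟩

lemma trans_split (X : List Int) (d : PySem.Dict Int (List Int)) (c s : Int) :
    transA X d c s = (c + (transA X d 0 s).1, (transA X d 0 s).2) := by
  simp [transA]

lemma wTrans_nonneg (X : List Int) (s : Int) : 0 ≤ wTrans X s := by
  simp only [wTrans, transA]
  split_ifs <;> omega

lemma sOrb_succ (X : List Int) (j : Nat) : sOrb X (j + 1) = Ftrans X (sOrb X j) :=
  Function.iterate_succ_apply' _ _ _

lemma sOrb_bounds (X : List Int) (h : X ≠ []) (j : Nat) :
    0 ≤ sOrb X j ∧ sOrb X j < X.length := by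
  have hn : 0 < (X.length : Int) := by
    have := List.length_pos_iff.mpr h; omega
  cases j with
  | zero => exact ⟨le_refl 0, hn⟩
  | succ j =>
    rw [sOrb_succ]
    simp only [Ftrans, transA]
    exact ⟨PySem.Int.mod_nonneg _ hn, PySem.Int.mod_lt _ hn⟩

lemma Wsum_succ (X : List Int) (j : Nat) :
    WsumA X (j + 1) = WsumA X j + wTrans X (sOrb X j) := by
  simp [WsumA, List.range_succ]

lemma Wsum_mono (X : List Int) {j k : Nat} (h : j ≤ k) : WsumA X j ≤ WsumA X k := by
  induction k with
  | zero =>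
    have : j = 0 := by omega
    subst this; exact le_refl _
  | succ k ih =>
    rcases Nat.eq_or_lt_of_le h with rfl | hlt
    · exact le_refl _
    · calc WsumA X j ≤ WsumA X k := ih (by omega)
        _ ≤ WsumA X (k + 1) := by rw [Wsum_succ]; have := wTrans_nonneg X (sOrb X k); omega

lemma mu_exists' (X : List Int) (h : X ≠ []) :
    ∃ j, j ≤ X.length ∧ sOrb X j ∈ (List.range j).map (sOrb X) := by
  classical
  have hmaps : ∀ a : Fin (X.length + 1), (True) → sOrb X a ∈ Finset.Ico (0 : Int) (X.length : Int) := by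
    intro a _
    have := sOrb_bounds X h a
    simp [Finset.mem_Ico, this.1, this.2]
  obtain ⟨i, _, j, _, hne, heq⟩ :=
    Finset.exists_ne_map_eq_of_card_lt_of_maps_to
      (s := (Finset.univ : Finset (Fin (X.length + 1))))
      (t := Finset.Ico (0 : Int) (X.length : Int))
      (by rw [Finset.card_univ, Fintype.card_fin, Int.card_Ico]; omega)
      (f := fun a => sOrb X a) (fun a _ => hmaps a trivial)
  rcases Nat.lt_or_ge i.val j.val with hij | hij
  · exact ⟨j, by omega, List.mem_map.mpr ⟨i, List.mem_range.mpr hij, heq⟩⟩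
  · have hij' : j.val < i.val := by
      rcases Nat.eq_or_lt_of_le hij with he | hlt
      · exact absurd (Fin.ext he.symm) hne
      · omega
    exact ⟨i, by omega, List.mem_map.mpr ⟨j, List.mem_range.mpr hij', heq.symm⟩⟩

lemma mu_exists (X : List Int) (h : X ≠ []) : ∃ j, sOrb X j ∈ (List.range j).map (sOrb X) := by
  obtain ⟨j, _, hj⟩ := mu_exists' X h; exact ⟨j, hj⟩

def muN (X : List Int) (h : X ≠ []) : Nat := Nat.find (mu_exists X h)

lemma mu_le (X : List Int) (h : X ≠ []) : muN X h ≤ X.length := by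
  obtain ⟨j, hle, hj⟩ := mu_exists' X h
  exact le_trans (Nat.find_min' _ hj) hle

lemma p_exists (X : List Int) (h : X ≠ []) :
    ∃ t, sOrb X t = sOrb X (muN X h) ∧ t < muN X h := by
  have := Nat.find_spec (mu_exists X h)
  obtain ⟨t, ht, heq⟩ := List.mem_map.mp this
  exact ⟨t, heq.symm ▸ rfl, List.mem_range.mp ht⟩

def pN (X : List Int) (h : X ≠ []) : Nat :=
  Nat.find (⟨(p_exists X h).choose, ((p_exists X h).choose_spec).1⟩ :
    ∃ t, sOrb X t = sOrb X (muN X h))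

lemma pN_spec (X : List Int) (h : X ≠ []) : sOrb X (pN X h) = sOrb X (muN X h) :=
  Nat.find_spec (⟨(p_exists X h).choose, ((p_exists X h).choose_spec).1⟩ :
    ∃ t, sOrb X t = sOrb X (muN X h))

lemma pN_lt (X : List Int) (h : X ≠ []) : pN X h < muN X h := by
  obtain ⟨t, heq, hlt⟩ := p_exists X h
  exact lt_of_le_of_lt (Nat.find_min' _ heq) hlt

lemma orb_distinct (X : List Int) (h : X ≠ []) {i j : Nat} (hij : i < j) (hj : j < muN X h) :
    sOrb X i ≠ sOrb X j := by
  intro heq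
  exact (Nat.find_min (mu_exists X h) hj) (List.mem_map.mpr ⟨i, List.mem_range.mpr hij, heq⟩)

lemma pN_min (X : List Int) (h : X ≠ []) {t : Nat} (ht : t < pN X h) :
    sOrb X t ≠ sOrb X (muN X h) := Nat.find_min _ ht

def visitedL (X : List Int) (j : Nat) : List Int := (List.range j).map (sOrb X)
def indicF (X : List Int) (j : Nat) (i : Nat) : Int :=
  if ((i : Int)) ∈ visitedL X j then 1 else 0
def indicL (X : List Int) (j : Nat) : List Int :=
  (List.range X.length).map (indicF X j)

lemma indicL_length (X : List Int) (j : Nat) : (indicL X j).length = X.length := by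
  simp [indicL]

lemma indicL_getElem (X : List Int) (j i : Nat) (hi : i < (indicL X j).length) :
    (indicL X j)[i] = indicF X j i := by
  simp [indicL]

lemma indic_get (X : List Int) (h : X ≠ []) (j k : Nat) :
    PySem.List.pyGetD (indicL X j) (sOrb X k) 0 =
      (if sOrb X k ∈ visitedL X j then 1 else 0) := by
  obtain ⟨h0, h1⟩ := sOrb_bounds X h k
  rw [PySem.List.pyGetD_eq_getElem _ _ h0 (by simpa [indicL_length] using h1)]
  rw [indicL_getElem, indicF, Int.toNat_of_nonneg h0]

lemma indic_set (X : List Int) (h : X ≠ []) (j : Nat) :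
    (indicL X j).set (sOrb X j).toNat 1 = indicL X (j + 1) := by
  obtain ⟨h0, h1⟩ := sOrb_bounds X h j
  apply List.ext_getElem
  · simp [indicL_length]
  · intro i hi hi'
    have hiX : i < X.length := by simpa [indicL] using hi'
    by_cases hc : i = (sOrb X j).toNat
    · subst hc
      rw [List.getElem_set_self (by simpa [indicL_length] using hiX)]
      have hcast : ((sOrb X j).toNat : Int) = sOrb X j := Int.toNat_of_nonneg h0
      rw [indicL_getElem, indicF, hcast]
      have hmem : sOrb X j ∈ visitedL X (j + 1) := by
        simp [visitedL, List.range_succ]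
      rw [if_pos hmem]
    · rw [List.getElem_set_ne (by omega)]
      rw [indicL_getElem, indicL_getElem]
      unfold indicF
      have hne : ((i : Int)) ≠ sOrb X j := by
        intro he; apply hc; omega
      have hiff : ((i : Int)) ∈ visitedL X (j + 1) ↔ ((i : Int)) ∈ visitedL X j := by
        simp only [visitedL, List.range_succ, List.map_append, List.mem_append]
        simp [hne]
      by_cases hm : ((i : Int)) ∈ visitedL X j
      · rw [if_pos hm, if_pos (hiff.mpr hm)]
      · rw [if_neg hm, if_neg (fun hx => hm (hiff.mp hx))]

lemma appear_run (X : List Int) (h : X ≠ []) :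
    ∀ (fuel j : Nat), j ≤ muN X h → muN X h < j + fuel →
      appearLoop X (buildD X) (indicL X j) (sOrb X j) fuel = sOrb X (muN X h) := by
  intro fuel
  induction fuel with
  | zero => intro j h1 h2; omega
  | succ fuel ih =>
    intro j h1 h2
    rcases Nat.eq_or_lt_of_le h1 with heq | hlt
    · have hmem : sOrb X j ∈ visitedL X j := by
        rw [heq]; exact Nat.find_spec (mu_exists X h)
      simp only [appearLoop, indic_get X h j j, if_pos hmem]
      norm_num
      exact congrArg (sOrb X) heq
    · have hnmem : sOrb X j ∉ visitedL X j := by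
        intro hmem
        exact (Nat.find_min (mu_exists X h) hlt) hmem
      simp only [appearLoop, indic_get X h j j, if_neg hnmem]
      norm_num
      rw [indic_set X h j]
      have hstep : (transA X (buildD X) 0 (sOrb X j)).2 = sOrb X (j + 1) := (sOrb_succ X j).symm
      rw [hstep]
      exact ih (j + 1) (by omega) (by omega)

lemma whileNe_run (X : List Int) (h : X ≠ []) (target : Int) :
    ∀ (fuel : Nat) (j e : Nat) (c : Int), j ≤ e → e < j + fuel → sOrb X e = target →
      (∀ t, j ≤ t → t < e → sOrb X t ≠ target) →
      whileNeLoop X (buildD X) target c (sOrb X j) fuel =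
        (c + (WsumA X e - WsumA X j), target) := by
  intro fuel
  induction fuel with
  | zero => intro j e c h1 h2; omega
  | succ fuel ih =>
    intro j e c h1 h2 he hmin
    rcases Nat.eq_or_lt_of_le h1 with rfl | hlt
    · simp only [whileNeLoop, he]
      rw [if_neg (show ¬ (target ≠ target) from fun hh => hh rfl)]
      norm_num
    · have hne : sOrb X j ≠ target := hmin j le_rfl hlt
      simp only [whileNeLoop, if_pos hne]
      rw [trans_split]
      have hF : (transA X (buildD X) 0 (sOrb X j)).2 = sOrb X (j + 1) := (sOrb_succ X j).symm
      have hw : (transA X (buildD X) 0 (sOrb X j)).1 = wTrans X (sOrb X j) := rfl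
      rw [hF, hw]
      rw [ih (j + 1) e _ (by omega) (by omega) he (fun t ht1 ht2 => hmin t (by omega) ht2)]
      rw [Wsum_succ]
      ring_nf

lemma rest_run (X : List Int) (h : X ≠ []) (K : Int) :
    ∀ (fuel : Nat) (j e : Nat) (c : Int), j ≤ e → e < j + fuel →
      (∀ t, j ≤ t → t < e → c + (WsumA X t - WsumA X j) ≤ K) →
      (K < c + (WsumA X e - WsumA X j)) →
      restLoop X (buildD X) K c (sOrb X j) fuel = sOrb X e := by
  intro fuel
  induction fuel with
  | zero => intro j e c h1 h2; omega
  | succ fuel ih =>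
    intro j e c h1 h2 hbelow habove
    rcases Nat.eq_or_lt_of_le h1 with rfl | hlt
    · have : ¬ (c ≤ K) := by
        have := habove; omega
      simp only [restLoop, if_neg this]
    · have hcle : c ≤ K := by
        have := hbelow j le_rfl hlt; omega
      simp only [restLoop, if_pos hcle]
      rw [trans_split]
      have hF : (transA X (buildD X) 0 (sOrb X j)).2 = sOrb X (j + 1) := (sOrb_succ X j).symm
      have hw : (transA X (buildD X) 0 (sOrb X j)).1 = wTrans X (sOrb X j) := rfl
      rw [hF, hw]
      apply ih (j + 1) e _ (by omega) (by omega)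
      · intro t ht1 ht2
        have := hbelow t (by omega) ht2
        have hWs := Wsum_succ X j
        omega
      · have hWs := Wsum_succ X j
        omega

lemma dropWhile_append_not_mem {a : List Int} {x : Int} (h : x ∉ a) (b : List Int) :
    ((a ++ x :: b).dropWhile (fun y => y != x)) = x :: b := by
  induction a with
  | nil => simp
  | cons c t ih =>
    have hc : c ≠ x := fun he => h (he ▸ List.mem_cons_self ..)
    simp only [List.cons_append, List.dropWhile_cons]
    rw [if_pos (by simpa using hc)]
    exact ih (fun hm => h (List.mem_cons_of_mem _ hm))

-- popping to x removes everything above (and) the LAST x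
lemma popTo_append {S T : List Int} {x : Int} (hT : x ∉ T) :
    popTo (S ++ x :: T) x = S := by
  rw [popTo, List.reverse_append, List.reverse_cons]
  rw [List.append_assoc, List.singleton_append]
  rw [dropWhile_append_not_mem (by simpa using hT)]
  simp

-- a pop triggered by y ∈ T stays inside T
lemma popTo_lift {S T : List Int} {y : Int} (hy : y ∈ T) :
    popTo (S ++ T) y = S ++ popTo T y := by
  obtain ⟨T1, T2, he, hnot⟩ : ∃ T1 T2, T = T1 ++ y :: T2 ∧ y ∉ T2 := by
    induction T with
    | nil => cases hy
    | cons c t ih =>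
      by_cases hmem : y ∈ t
      · obtain ⟨T1, T2, he, hnot⟩ := ih hmem
        exact ⟨c :: T1, T2, by rw [he]; rfl, hnot⟩
      · have : c = y := by
          rcases List.mem_cons.mp hy with he | hm
          · exact he.symm
          · exact absurd hm hmem
        exact ⟨[], t, by rw [this]; rfl, hmem⟩
  subst he
  rw [← List.append_assoc, popTo_append hnot, popTo_append hnot]

lemma popTo_subset {T : List Int} {y z : Int} (hz : z ∈ popTo T y) : z ∈ T := by
  have h1 : (T.reverse.dropWhile (fun y' => y' != y)).tail.Sublist T.reverse := by
    exact (List.tail_sublist _).trans (List.dropWhile_sublist _)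
  have : z ∈ T.reverse := h1.mem (by simpa [popTo] using hz)
  simpa using this

lemma stackStep_subset {S : List Int} {x z : Int} (hz : z ∈ stackStep S x) :
    z ∈ S ∨ z = x := by
  unfold stackStep at hz
  split_ifs at hz with hc
  · exact Or.inl (popTo_subset hz)
  · rcases List.mem_append.mp hz with h | h
    · exact Or.inl h
    · exact Or.inr (by simpa using h)

lemma stackRed_subset : ∀ (seg S : List Int) {z : Int}, z ∈ seg.foldl stackStep S →
    z ∈ S ∨ z ∈ seg := by
  intro seg
  induction seg with
  | nil => intro S z hz; exact Or.inl (by simpa using hz)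
  | cons y t ih =>
    intro S z hz
    rcases ih (stackStep S y) (by simpa using hz) with h | h
    · rcases stackStep_subset h with h' | h'
      · exact Or.inl h'
      · exact Or.inr (h' ▸ List.mem_cons_self ..)
    · exact Or.inr (List.mem_cons_of_mem _ h)

-- a disjoint lower stack S is inert
lemma stackRed_lift : ∀ (seg S T : List Int), (∀ a ∈ S, a ∉ seg) →
    seg.foldl stackStep (S ++ T) = S ++ seg.foldl stackStep T := by
  intro seg
  induction seg with
  | nil => intro S T _; rfl
  | cons y t ih =>
    intro S T hd
    have hyS : y ∉ S := fun hm => hd y hm (List.mem_cons_self ..)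
    simp only [List.foldl_cons]
    have hstep : stackStep (S ++ T) y = S ++ stackStep T y := by
      unfold stackStep
      by_cases hyT : y ∈ T
      · rw [if_pos (by simp [List.contains_eq_mem]; exact Or.inr hyT),
          if_pos (by simpa [List.contains_eq_mem] using hyT)]
        exact popTo_lift hyT
      · rw [if_neg (by simp [List.contains_eq_mem]; exact ⟨hyS, hyT⟩),
          if_neg (by simpa [List.contains_eq_mem] using hyT)]
        simp
    rw [hstep]
    exact ih S _ (fun a ha hm => hd a ha (List.mem_cons_of_mem _ hm))

-- E1: a value with no later occurrence stays at the bottom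
lemma stackRed_cons_not_mem {x : Int} {r : List Int} (h : x ∉ r) :
    (x :: r).foldl stackStep [] = x :: r.foldl stackStep [] := by
  have h0 : stackStep [] x = [x] := by simp [stackStep]
  simp only [List.foldl_cons, h0]
  have := stackRed_lift r [x] [] (by simpa using h)
  simpa using this

-- E2: everything up to (and incl.) the next occurrence of x cancels
lemma stackRed_cons_mem {x : Int} {u v : List Int} (h : x ∉ u) :
    (x :: (u ++ x :: v)).foldl stackStep [] = v.foldl stackStep [] := by
  have h0 : stackStep [] x = [x] := by simp [stackStep]
  simp only [List.foldl_cons, List.foldl_append, h0]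
  have h1 : u.foldl stackStep [x] = [x] ++ u.foldl stackStep [] := by
    have := stackRed_lift u [x] [] (by simpa using h)
    simpa using this
  rw [h1]
  set T0 := u.foldl stackStep [] with hT0
  have hT0sub : ∀ z ∈ T0, z ∈ u := by
    intro z hz
    rcases stackRed_subset u [] hz with h' | h'
    · cases h'
    · exact h'
  have hxT0 : x ∉ T0 := fun hm => h (hT0sub x hm)
  have hstep : stackStep ([x] ++ T0) x = [] := by
    unfold stackStep
    rw [if_pos (by simp)]
    have := popTo_append (S := []) (T := T0) (x := x) hxT0
    simpa using this
  rw [hstep]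

lemma naive_suffix (X : List Int) : ∀ (fuel i : Nat) (ret : List Int),
    i ≤ X.length → X.length - i < fuel →
    naiveLoop X (buildD X) ret (i : Int) fuel = ret ++ (X.drop i).foldl stackStep [] := by
  intro fuel
  induction fuel with
  | zero => intro i ret h1 h2; omega
  | succ fuel ih =>
    intro i ret h1 h2
    rcases Nat.eq_or_lt_of_le h1 with heq | hlt
    · subst heq
      simp only [naiveLoop]
      rw [if_neg (by omega)]
      simp
    · -- i < X.length
      have hi0 : (0 : Int) ≤ (i : Int) := by omega
      have hiX : ((i : Int)) < (X.length : Int) := by omega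
      set x := PySem.List.pyGetD X (i : Int) 0 with hxdef
      have hxval : x = X[i] := by
        rw [hxdef, PySem.List.pyGetD_eq_getElem _ _ hi0 hiX]; simp
      set l := occL X x with hldef
      have hmem : (i : Int) ∈ l := self_mem_occ hi0 hiX
      have hnil : l ≠ [] := List.ne_nil_of_mem hmem
      have hsorted : l.Pairwise (· < ·) := occ_sorted X x
      have hlast : PySem.List.pyGetD l (-1) 0 = l.getLast hnil := PySem.List.pyGetD_neg_one l 0 hnil
      have hlast_mem : l.getLast hnil ∈ l := List.getLast_mem hnil
      have hlast_max : ∀ y ∈ l, y ≤ l.getLast hnil := by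
        intro y hy
        obtain ⟨a, ha, rfl⟩ := List.mem_iff_getElem.mp hy
        have hgl : l.getLast hnil = l[l.length - 1] := (List.getLast_eq_getElem hnil)
        rcases Nat.eq_or_lt_of_le (Nat.le_pred_of_lt ha) with he | hlt'
        · rw [hgl]
          exact le_of_eq (by congr 1)
        · rw [hgl]
          exact le_of_lt (List.pairwise_iff_getElem.mp hsorted a (l.length - 1) ha (by omega) (by omega))
      by_cases hlater : ∃ j ∈ l, (i : Int) < j
      · -- jump branch
        obtain ⟨hk_le, hk_lo, hk_hi⟩ :=
          PySem.List.bisectRight_spec l (i : Int) (hsorted.imp (fun h => le_of_lt h))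
        set k := PySem.List.bisectRight l (i : Int) with hkdef
        have hklt : k < l.length := by
          by_contra hcon
          obtain ⟨j, hj, hij⟩ := hlater
          obtain ⟨a, ha, rfl⟩ := List.mem_iff_getElem.mp hj
          exact absurd (hk_lo a ha (by omega)) (by omega)
        have hne : l.getLast hnil ≠ (i : Int) := by
          obtain ⟨j, hj, hij⟩ := hlater
          have := hlast_max j hj
          omega
        simp only [naiveLoop]
        rw [if_pos hiX, ← hxdef, getD_buildD, ← hldef, hlast, if_pos hne, ← hkdef]
        have hidx : PySem.List.pyGetD l ((k : Int)) 0 = l[k] := by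
          rw [PySem.List.pyGetD_natCast]
          exact List.getD_eq_getElem l 0 hklt
        rw [hidx]
        -- l[k] is a genuine later occurrence: X[j0N] = x with i < j0N < X.length
        obtain ⟨j0N, hj0N, hj0e, hj0x⟩ := mem_occL.mp (List.getElem_mem hklt)
        have hij0 : i < j0N := by
          have h3 : ((i : Int)) < ((j0N : Int)) := hj0e ▸ hk_hi k hklt le_rfl
          omega
        -- minimality: no occurrence of x strictly between i and j0N
        have hmin : ∀ (t : Nat) (htX : t < X.length), i < t → t < j0N → X[t] ≠ x := by
          intro t htX ht1 ht2 he
          have htl : ((t : Int)) ∈ l := mem_occL.mpr ⟨t, htX, rfl, he⟩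
          obtain ⟨a, ha, hae⟩ := List.mem_iff_getElem.mp htl
          have hak : a < k := by
            by_contra hcon
            rcases Nat.eq_or_lt_of_le (Nat.le_of_not_lt hcon) with he' | hlt'
            · have h5 : ((j0N : Int)) = ((t : Int)) := by
                rw [← hj0e, ← hae]; congr 1
              omega
            · have h6 := List.pairwise_iff_getElem.mp hsorted k a hklt ha hlt'
              rw [hj0e, hae] at h6
              omega
          have h4 : ((t : Int)) ≤ ((i : Int)) := hae ▸ hk_lo a ha hak
          omega
        rw [hj0e]
        have hcast : ((j0N : Int)) + 1 = (((j0N + 1 : Nat)) : Int) := by push_cast; ring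
        rw [hcast, ih (j0N + 1) ret (by omega) (by omega)]
        congr 1
        -- decompose X.drop i = x :: u ++ x :: v with x ∉ u
        have hdropi : X.drop i = X[i] :: X.drop (i + 1) := List.drop_eq_getElem_cons hlt
        have hdropj : X.drop j0N = X[j0N] :: X.drop (j0N + 1) := List.drop_eq_getElem_cons hj0N
        set u := (X.drop (i + 1)).take (j0N - (i + 1)) with hudef
        have hsplit : X.drop (i + 1) = u ++ X.drop j0N := by
          rw [hudef]
          have : X.drop j0N = (X.drop (i + 1)).drop (j0N - (i + 1)) := by
            rw [List.drop_drop]; congr 1; omega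
          rw [this, List.take_append_drop]
        have hxu : x ∉ u := by
          intro hxmem
          obtain ⟨q, hq, hqe⟩ := List.mem_iff_getElem.mp hxmem
          have hqlen : q < j0N - (i + 1) := by
            have := hq
            simp only [hudef, List.length_take, List.length_drop] at this
            omega
          have hqX : i + 1 + q < X.length := by
            simp only [hudef, List.length_take, List.length_drop] at hq
            omega
          have hidx2 : u[q] = X[i + 1 + q] := by
            simp only [hudef]
            rw [List.getElem_take, List.getElem_drop]
          rw [hidx2] at hqe
          exact hmin (i + 1 + q) hqX (by omega) (by omega) hqe
        rw [hdropi, hsplit, hdropj, ← hxval, ← hj0x]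
        exact (stackRed_cons_mem (x := X[j0N]) (by rw [hj0x]; exact hxu)).symm
      · -- append branch
        rw [not_exists] at hlater
        simp only [not_and, not_lt] at hlater
        have hle : l.getLast hnil ≤ (i : Int) := hlater _ hlast_mem
        have hge : (i : Int) ≤ l.getLast hnil := hlast_max _ hmem
        have heq : l.getLast hnil = (i : Int) := le_antisymm hle hge
        simp only [naiveLoop]
        rw [if_pos hiX, ← hxdef, getD_buildD, ← hldef, hlast, if_neg (by simp [heq])]
        have hcast : ((i : Int)) + 1 = (((i + 1 : Nat)) : Int) := by push_cast; ring
        rw [hcast, ih (i + 1) (ret ++ [x]) (by omega) (by omega)]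
        have hxnot : x ∉ X.drop (i + 1) := by
          intro hxmem
          obtain ⟨q, hq, hqe⟩ := List.mem_iff_getElem.mp hxmem
          rw [List.getElem_drop] at hqe
          have : ((i + 1 + q : Nat) : Int) ∈ l := mem_occL.mpr ⟨i + 1 + q, by
            rw [List.length_drop] at hq; omega, rfl, hqe⟩
          have := hlater _ this
          omega
        have hdropi : X.drop i = X[i] :: X.drop (i + 1) := List.drop_eq_getElem_cons hlt
        rw [hdropi, ← hxval, stackRed_cons_not_mem hxnot]
        simp

-- table values against the abstract transition
lemma table_F (A : List Int) {s : Int} (h0 : 0 ≤ s) (hn : s < A.length) :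
    PySem.List.pyGetD (buildTables A).1 s 0 = Ftrans A s := by
  rw [PySem.List.pyGetD_of_nonneg _ _ h0, (table_char A h0 hn).1, Ftrans, transA_char A h0 hn 0]

lemma table_w (A : List Int) {s : Int} (h0 : 0 ≤ s) (hn : s < A.length) :
    PySem.List.pyGetD (buildTables A).2 s 0 = wTrans A s := by
  rw [PySem.List.pyGetD_of_nonneg _ _ h0, (table_char A h0 hn).2, wTrans, transA_char A h0 hn 0]
  ring

lemma mu_spec_mem (X : List Int) (h : X ≠ []) :
    sOrb X (muN X h) ∈ (List.range (muN X h)).map (sOrb X) := Nat.find_spec (mu_exists X h)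

lemma mu_pos (X : List Int) (h : X ≠ []) : 1 ≤ muN X h := by
  by_contra hcon
  have h0 : muN X h = 0 := by omega
  have := mu_spec_mem X h
  rw [h0] at this
  simp at this

def stL (X : List Int) (k : Nat) : List Int := (List.range k).map (sOrb X)
def wL (X : List Int) (k : Nat) : List Int := (List.range k).map (WsumA X)
def seenL (X : List Int) (k : Nat) : PySem.Dict Int Int :=
  PySem.Dict.mk ((List.range k).map (fun t => (sOrb X t, (t : Int))))

lemma stL_append (X : List Int) (k : Nat) : stL X (k + 1) = stL X k ++ [sOrb X k] := by
  simp [stL, List.range_succ]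
lemma wL_append (X : List Int) (k : Nat) : wL X (k + 1) = wL X k ++ [WsumA X k] := by
  simp [wL, List.range_succ]
lemma stL_length (X : List Int) (k : Nat) : (stL X k).length = k := by simp [stL]
lemma wL_length (X : List Int) (k : Nat) : (wL X k).length = k := by simp [wL]

lemma seen_keys (X : List Int) (k : Nat) : (seenL X k).keys = stL X k := by
  simp [seenL, PySem.Dict.keys_mk, stL, List.map_map, Function.comp_def]

lemma seen_contains (X : List Int) (k : Nat) (s : Int) :
    (seenL X k).contains s = true ↔ s ∈ stL X k := by
  rw [PySem.Dict.contains_iff_mem_keys, seen_keys]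

lemma stL_nodup (X : List Int) (h : X ≠ []) {k : Nat} (hk : k ≤ muN X h) : (stL X k).Nodup := by
  rw [stL, List.nodup_map_iff_inj_on (List.nodup_range)]
  intro i hi j hj hne
  rcases Nat.lt_or_ge i j with hij | hij
  · exact absurd hne (orb_distinct X h hij (by simp at hj; omega))
  · rcases Nat.eq_or_lt_of_le hij with he | hlt
    · omega
    · exact absurd hne.symm (orb_distinct X h hlt (by simp at hi; omega))

lemma orbit_run (X : List Int) (h : X ≠ []) :
    ∀ (fuel i : Nat), 1 ≤ i → i ≤ muN X h → muN X h < i + fuel →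
      orbitLoop (buildTables X).1 (buildTables X).2 (stL X i) (wL X i) (seenL X i) fuel =
        (stL X (muN X h + 1), wL X (muN X h + 1), seenL X (muN X h)) := by
  intro fuel
  induction fuel with
  | zero => intro i h1 h2 h3; omega
  | succ fuel ih =>
    intro i h1 h2 h3
    obtain ⟨i', rfl⟩ : ∃ i', i = i' + 1 := ⟨i - 1, by omega⟩
    have hlast : PySem.List.pyGetD (stL X (i' + 1)) (-1) 0 = sOrb X i' := by
      rw [stL_append, PySem.List.pyGetD_neg_one_append_singleton]
    have hwlast : PySem.List.pyGetD (wL X (i' + 1)) (-1) 0 = WsumA X i' := by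
      rw [wL_append, PySem.List.pyGetD_neg_one_append_singleton]
    obtain ⟨hb0, hb1⟩ := sOrb_bounds X h i'
    have hs2 : PySem.List.pyGetD (buildTables X).1 (sOrb X i') 0 = sOrb X (i' + 1) := by
      rw [table_F X hb0 hb1, ← sOrb_succ]
    have hw2 : PySem.List.pyGetD (buildTables X).2 (sOrb X i') 0 = wTrans X (sOrb X i') := by
      rw [table_w X hb0 hb1]
    simp only [orbitLoop, hlast, hwlast, hs2, hw2]
    rw [← stL_append, ← Wsum_succ, ← wL_append]
    rcases Nat.eq_or_lt_of_le h2 with heq | hlt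
    · -- i = mu: break
      have hmem : sOrb X (i' + 1) ∈ stL X (i' + 1) := by
        rw [heq]
        have := mu_spec_mem X h
        simpa [stL] using this
      rw [if_pos ((seen_contains X (i' + 1) _).mpr hmem)]
      rw [heq]
    · -- still new
      have hnmem : sOrb X (i' + 1) ∉ stL X (i' + 1) := by
        intro hmem
        simp only [stL, List.mem_map] at hmem
        obtain ⟨t, ht, hte⟩ := hmem
        exact (orb_distinct X h (List.mem_range.mp ht) hlt) hte
      have hcf : (seenL X (i' + 1)).contains (sOrb X (i' + 1)) = false := by
        rw [Bool.eq_false_iff]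
        exact fun hc => hnmem ((seen_contains _ _ _).mp hc)
      rw [if_neg (by rw [hcf]; exact Bool.false_ne_true)]
      have hins : (seenL X (i' + 1)).insert (sOrb X (i' + 1)) (((stL X (i' + 1) ++ [sOrb X (i' + 1)]).length : Int) - 1) =
          seenL X (i' + 2) := by
        apply PySem.Dict.ext
        rw [PySem.Dict.items_insert_of_not_contains _ _ hcf]
        show ((List.range (i' + 1)).map (fun t => (sOrb X t, (t : Int)))) ++ _ = _
        have hlen : ((stL X (i' + 1) ++ [sOrb X (i' + 1)]).length : Int) - 1 = ((i' + 1 : Nat) : Int) := by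
          rw [List.length_append, stL_length, List.length_singleton]
          push_cast; omega
        rw [hlen]
        show _ = (List.range (i' + 2)).map (fun t => (sOrb X t, (t : Int)))
        simp [List.range_succ, List.append_assoc]
      rw [← stL_append] at hins
      rw [hins]
      have := ih (i' + 2) (by omega) (by omega) (by omega)
      convert this using 2

lemma stL_get (X : List Int) {k m : Nat} (hk : k < m) :
    PySem.List.pyGetD (stL X m) ((k : Int)) 0 = sOrb X k := by
  rw [PySem.List.pyGetD_natCast, List.getD_eq_getElem _ _ (by rw [stL_length]; omega)]
  simp [stL]

lemma wL_get (X : List Int) {k m : Nat} (hk : k < m) :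
    PySem.List.pyGetD (wL X m) ((k : Int)) 0 = WsumA X k := by
  rw [PySem.List.pyGetD_natCast, List.getD_eq_getElem _ _ (by rw [wL_length]; omega)]
  simp [wL]

lemma findIdx_map_range {f : Nat → Int} {q : Int → Bool} {m t : Nat} (ht : t < m)
    (hq : q (f t) = true) (hmin : ∀ u, u < t → q (f u) = false) :
    ((List.range m).map f).findIdx q = t := by
  rw [List.findIdx_eq (by simp only [List.length_map, List.length_range]; omega)]
  constructor
  · rw [List.getElem_map, List.getElem_range]
    exact hq
  · intro j hj
    rw [List.getElem_map, List.getElem_range]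
    exact hmin j hj

lemma wL_drop (X : List Int) (p m : Nat) (hpm : p ≤ m) :
    (wL X m).drop p = (List.range (m - p)).map (fun u => WsumA X (p + u)) := by
  apply List.ext_getElem
  · simp [wL_length]
  · intro i h1 h2
    rw [List.getElem_drop, List.getElem_map, List.getElem_range]
    have hpi : p + i < m := by
      rw [List.length_drop, wL_length] at h1
      omega
    show (wL X m)[p + i]'(by rw [wL_length]; omega) = _
    simp [wL]

lemma naive_eq_stack (Y : List Int) : solve_naive Y = Y.foldl stackStep [] := by
  have h := naive_suffix Y (Y.length + 1) 0 [] (by omega) (by omega)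
  simpa [solve_naive] using h

lemma seen_getD (A : List Int) (h : A ≠ []) :
    (seenL A (muN A h)).getD (sOrb A (muN A h)) 0 = ((pN A h : Nat) : Int) := by
  have hmemitems : (sOrb A (muN A h), ((pN A h : Nat) : Int)) ∈ (seenL A (muN A h)).items := by
    show _ ∈ (List.range (muN A h)).map _
    refine List.mem_map.mpr ⟨pN A h, List.mem_range.mpr (pN_lt A h), ?_⟩
    rw [pN_spec A h]
  exact PySem.Dict.getD_of_mem_items _ hmemitems
    (by rw [seen_keys]; exact stL_nodup A h le_rfl) 0

-- ===== VERDICT (by name: the statement is the Claim_ definition above) =====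
-- the A-side: solve reduces to solve_naive of a computed suffix; the B-side: the same suffix, stack-folded
theorem solve_spec : Claim_equal_solve := by
  unfold Claim_equal_solve
  intro A K _ hpre
  have h : A ≠ [] := hpre
  unfold Spec_solve
  have hnpos : 0 < A.length := List.length_pos_iff.mpr h
  have hμn : muN A h ≤ A.length := mu_le A h
  have hpμ : pN A h < muN A h := pN_lt A h
  have hs0 : sOrb A 0 = 0 := rfl
  have hW0 : WsumA A 0 = 0 := rfl
  -- A-side loop values
  have hrepl : List.replicate A.length 0 = indicL A 0 := by
    apply List.ext_getElem
    · simp [indicL_length]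
    · intro i h1 h2
      rw [List.getElem_replicate, indicL_getElem]
      simp [indicF, visitedL]
  have hLS : appearLoop A (buildD A) (List.replicate A.length 0) 0 (A.length + 1) =
      sOrb A (muN A h) := by
    rw [hrepl]
    have := appear_run A h (A.length + 1) 0 (by omega) (by omega)
    simpa [hs0] using this
  have hBL : whileNeLoop A (buildD A) (sOrb A (muN A h)) 0 0 (A.length + 1) =
      (WsumA A (pN A h), sOrb A (muN A h)) := by
    have hmin : ∀ t, 0 ≤ t → t < pN A h → sOrb A t ≠ sOrb A (muN A h) :=
      fun t _ ht => pN_min A h ht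
    have := whileNe_run A h (sOrb A (muN A h)) (A.length + 1) 0 (pN A h) 0
      (by omega) (by omega) (pN_spec A h) hmin
    simpa [hs0, hW0] using this
  have hstep1 : transA A (buildD A) 1 (sOrb A (muN A h)) =
      (1 + wTrans A (sOrb A (pN A h)), sOrb A (pN A h + 1)) := by
    rw [← pN_spec A h, trans_split]
    rw [show (transA A (buildD A) 0 (sOrb A (pN A h))).2 = sOrb A (pN A h + 1) from
      (sOrb_succ A (pN A h)).symm]
    rfl
  have hmin2 : ∀ t, pN A h + 1 ≤ t → t < muN A h → sOrb A t ≠ sOrb A (muN A h) := by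
    intro t h1 h2 he
    have h3 : sOrb A (pN A h) = sOrb A t := by rw [pN_spec A h, ← he]
    exact (orb_distinct A h (show pN A h < t by omega) h2) h3
  have hLC : (whileNeLoop A (buildD A) (sOrb A (muN A h))
        (transA A (buildD A) 1 (sOrb A (muN A h))).1
        (transA A (buildD A) 1 (sOrb A (muN A h))).2 (A.length + 1)).1 =
      1 + (WsumA A (muN A h) - WsumA A (pN A h)) := by
    rw [hstep1]
    have hrun := whileNe_run A h (sOrb A (muN A h)) (A.length + 1) (pN A h + 1) (muN A h)
      (1 + wTrans A (sOrb A (pN A h))) (by omega) (by omega) rfl hmin2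
    show (whileNeLoop A (buildD A) (sOrb A (muN A h)) (1 + wTrans A (sOrb A (pN A h)))
      (sOrb A (pN A h + 1)) (A.length + 1)).1 = _
    rw [hrun]
    have hWs := Wsum_succ A (pN A h)
    show 1 + wTrans A (sOrb A (pN A h)) + (WsumA A (muN A h) - WsumA A (pN A h + 1)) = _
    omega
  -- B-side orbit value
  have hOrb : orbitLoop (buildTables A).1 (buildTables A).2 [0] [0]
      (PySem.Dict.empty.insert 0 0) (A.length + 1) =
      (stL A (muN A h + 1), wL A (muN A h + 1), seenL A (muN A h)) := by
    have h1 : stL A 1 = [0] := by rw [stL, List.range_one]; simp [hs0]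
    have h2 : wL A 1 = [0] := by rw [wL, List.range_one]; simp [hW0]
    have h3 : seenL A 1 = PySem.Dict.empty.insert 0 0 := by rfl
    have horun := orbit_run A h (A.length + 1) 1 le_rfl (mu_pos A h) (by omega)
    rw [h1, h2, h3] at horun
    exact horun
  have hlast2 : PySem.List.pyGetD (stL A (muN A h + 1)) (-1) 0 = sOrb A (muN A h) := by
    rw [stL_append, PySem.List.pyGetD_neg_one_append_singleton]
  have hmlen : ((stL A (muN A h + 1)).length : Int) - 1 = ((muN A h : Nat) : Int) := by
    rw [stL_length]; push_cast; ring
  have hb : PySem.List.pyGetD (wL A (muN A h + 1)) (((pN A h : Nat)) : Int) 0 = WsumA A (pN A h) :=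
    wL_get A (by omega)
  have hWμ : PySem.List.pyGetD (wL A (muN A h + 1)) (((muN A h : Nat)) : Int) 0 = WsumA A (muN A h) :=
    wL_get A (by omega)
  by_cases hbr : K - 1 < WsumA A (pN A h)
  · -- pre-loop branch
    have hex : ∃ t, K - 1 ≤ WsumA A t := ⟨pN A h, by omega⟩
    set e0 := Nat.find hex with he0
    have he0p : e0 ≤ pN A h := Nat.find_min' hex (by omega)
    have he0spec : K - 1 ≤ WsumA A e0 := Nat.find_spec hex
    have he0min : ∀ u, u < e0 → ¬ (K - 1 ≤ WsumA A u) := fun u hu => Nat.find_min hex hu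
    have hrest : restLoop A (buildD A) (K - 1) 1 0 (A.length + 1) = sOrb A e0 := by
      have := rest_run A h (K - 1) (A.length + 1) 0 e0 1 (by omega) (by omega)
        (by intro t _ ht2
            have := he0min t ht2
            omega)
        (by omega)
      simpa [hs0, hW0] using this
    have hfind : (wL A (muN A h + 1)).findIdx (fun w => decide (K - 1 ≤ w)) = e0 := by
      rw [show wL A (muN A h + 1) = (List.range (muN A h + 1)).map (WsumA A) from rfl]
      exact findIdx_map_range (by omega) (by simpa using he0spec)
        (fun u hu => by simpa using he0min u hu)
    have hTB : PySem.List.pyGetD (stL A (muN A h + 1))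
        (((wL A (muN A h + 1)).findIdx (fun w => decide (K - 1 ≤ w)) : Nat) : Int) 0 =
        sOrb A e0 := by
      rw [hfind]
      exact stL_get A (by omega)
    -- A side
    have hA : solve A K = solve_naive (PySem.List.slice A (some (sOrb A e0)) none) := by
      simp only [solve]
      rw [hLS, hBL]
      rw [if_pos hbr]
      simp only [solve_rest]
      rw [hrest]
    -- B side
    have hB : solve_alt A K = (PySem.List.slice A (some (sOrb A e0)) none).foldl stackStep [] := by
      simp only [solve_alt]
      rw [hOrb]
      simp only
      rw [hlast2, seen_getD A h, hb, if_pos hbr, hTB]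
    rw [hA, hB, naive_eq_stack]
  · -- cycle branch
    have hC : 0 ≤ WsumA A (muN A h) - WsumA A (pN A h) := by
      have := Wsum_mono A (le_of_lt hpμ)
      omega
    set L := 1 + (WsumA A (muN A h) - WsumA A (pN A h)) with hLdef
    have hLpos : 0 < L := by omega
    set K2 := PySem.Int.mod (K - 1 - WsumA A (pN A h)) L with hK2def
    have hK2a : 0 ≤ K2 := PySem.Int.mod_nonneg _ hLpos
    have hK2b : K2 < L := PySem.Int.mod_lt _ hLpos
    have hexq : ∃ u, K2 ≤ WsumA A (pN A h + u) - WsumA A (pN A h) := by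
      refine ⟨muN A h - pN A h, ?_⟩
      rw [show pN A h + (muN A h - pN A h) = muN A h by omega]
      omega
    set eOff := Nat.find hexq with heOff
    have heOffb : eOff ≤ muN A h - pN A h := Nat.find_min' hexq (by
      rw [show pN A h + (muN A h - pN A h) = muN A h by omega]; omega)
    have heOffspec : K2 ≤ WsumA A (pN A h + eOff) - WsumA A (pN A h) := Nat.find_spec hexq
    have heOffmin : ∀ u, u < eOff → ¬ (K2 ≤ WsumA A (pN A h + u) - WsumA A (pN A h)) :=
      fun u hu => Nat.find_min hexq hu
    have hrest : restLoop A (buildD A) K2 1 (sOrb A (muN A h)) (A.length + 1) =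
        sOrb A (pN A h + eOff) := by
      rw [← pN_spec A h]
      exact rest_run A h K2 (A.length + 1) (pN A h) (pN A h + eOff) 1 (by omega) (by omega)
        (by intro t ht1 ht2
            have := heOffmin (t - pN A h) (by omega)
            rw [show pN A h + (t - pN A h) = t by omega] at this
            omega)
        (by omega)
    have hdrop : (wL A (muN A h + 1)).drop (((pN A h : Nat) : Int)).toNat =
        (List.range (muN A h + 1 - pN A h)).map (fun u => WsumA A (pN A h + u)) := by
      rw [Int.toNat_natCast]
      exact wL_drop A _ _ (by omega)
    have hfind : ((wL A (muN A h + 1)).drop (((pN A h : Nat) : Int)).toNat).findIdx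
        (fun w => decide (K2 ≤ w - WsumA A (pN A h))) = eOff := by
      rw [hdrop]
      exact findIdx_map_range (by omega) (by simpa using heOffspec)
        (fun u hu => by simpa using heOffmin u hu)
    have hTB : PySem.List.pyGetD (stL A (muN A h + 1))
        (((pN A h : Nat) : Int) + ((((wL A (muN A h + 1)).drop (((pN A h : Nat) : Int)).toNat).findIdx
          (fun w => decide (K2 ≤ w - WsumA A (pN A h))) : Nat) : Int)) 0 =
        sOrb A (pN A h + eOff) := by
      rw [hfind]
      rw [show ((pN A h : Nat) : Int) + ((eOff : Nat) : Int) = (((pN A h + eOff : Nat)) : Int) by push_cast; ring]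
      exact stL_get A (by omega)
    have hA : solve A K = solve_naive (PySem.List.slice A (some (sOrb A (pN A h + eOff))) none) := by
      simp only [solve]
      rw [hLS, hBL]
      rw [if_neg hbr]
      simp only [solve_rest]
      rw [hLC, ← hK2def, hrest]
    have hB : solve_alt A K = (PySem.List.slice A (some (sOrb A (pN A h + eOff))) none).foldl stackStep [] := by
      simp only [solve_alt]
      rw [hOrb]
      simp only
      rw [hlast2, seen_getD A h, hb, if_neg hbr, hmlen, hWμ, ← hLdef, ← hK2def, hTB]
    rw [hA, hB, naive_eq_stack]
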